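-- pv_equiv track=rewrite | github.com/zzzcccyyyggg/coverup | src/coverup/agents/repair.py | _remove_go_if_blocks_with_invalid_flagset_accessor
-- ===== SOURCE A (Python) =====
-- def _remove_go_if_blocks_with_invalid_flagset_accessor(test_code: str) -> tuple[str, bool]:
--     """Remove invalid `FlagSet` accessor assertion blocks plus nearby comments."""
--     lines = test_code.splitlines(keepends=True)
--     rewritten: list[str] = []
--     i = 0
--     changed = False
--     invalid_accessors = (".Output()", ".ErrorHandling()", ".Name()")
--
--     while i < len(lines):
--         line = lines[i]
--         stripped = line.lstrip()
--         if any(accessor in line for accessor in invalid_accessors) and stripped.startswith("if "):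
--             while rewritten and (rewritten[-1].strip().startswith("//") or rewritten[-1].strip() == ""):
--                 rewritten.pop()
--
--             depth = line.count("{") - line.count("}")
--             i += 1
--             while i < len(lines):
--                 depth += lines[i].count("{") - lines[i].count("}")
--                 if depth <= 0:
--                     i += 1
--                     break
--                 i += 1
--             changed = True
--             continue
--
--         rewritten.append(line)
--         i += 1
--
--     return "".join(rewritten), changed
-- ===== SOURCE B (Python) =====
-- def _remove_go_if_blocks_with_invalid_flagset_accessor(test_code: str) -> tuple[str, bool]:
--     """Remove invalid `FlagSet` accessor assertion blocks plus nearby comments.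
--
--     Two-pass rewrite: pass 1 tags every line that belongs to a removed if-block;
--     pass 2 walks the tagged lines backwards, absorbing the comment/blank lines
--     that immediately precede each removed block.
--     """
--     lines = test_code.splitlines(keepends=True)
--     invalid_accessors = (".Output()", ".ErrorHandling()", ".Name()")
--
--     # pass 1: tag each line with whether it is part of a removed if-block
--     tagged = []
--     i = 0
--     while i < len(lines):
--         line = lines[i]
--         if any(a in line for a in invalid_accessors) and line.lstrip().startswith("if "):
--             depth = line.count("{") - line.count("}")
--             tagged.append((line, True))
--             i += 1
--             while i < len(lines):
--                 depth += lines[i].count("{") - lines[i].count("}")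
--                 tagged.append((lines[i], True))
--                 i += 1
--                 if depth <= 0:
--                     break
--         else:
--             tagged.append((line, False))
--             i += 1
--
--     changed = any(deleted for _, deleted in tagged)
--
--     # pass 2: backwards walk; a removed block swallows preceding comment/blank lines
--     out = []
--     extending = False
--     for line, deleted in reversed(tagged):
--         if deleted:
--             extending = True
--         elif extending and (line.strip().startswith("//") or line.strip() == ""):
--             pass  # comment/blank line absorbed into the following removed block
--         else:
--             extending = False
--             out.append(line)
--     return "".join(reversed(out)), changed
-- ===== Notes on version B (the rewrite author's own statement) =====
-- stated objective: alternative
-- what changed: B splits the work into a forward tagging pass (marking lines of removed if-blocks) and a backward reconstruction pass that absorbs preceding comment/blank lines, instead of A's single forward pass that pops lines back off its output list.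
import Mathlib
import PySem

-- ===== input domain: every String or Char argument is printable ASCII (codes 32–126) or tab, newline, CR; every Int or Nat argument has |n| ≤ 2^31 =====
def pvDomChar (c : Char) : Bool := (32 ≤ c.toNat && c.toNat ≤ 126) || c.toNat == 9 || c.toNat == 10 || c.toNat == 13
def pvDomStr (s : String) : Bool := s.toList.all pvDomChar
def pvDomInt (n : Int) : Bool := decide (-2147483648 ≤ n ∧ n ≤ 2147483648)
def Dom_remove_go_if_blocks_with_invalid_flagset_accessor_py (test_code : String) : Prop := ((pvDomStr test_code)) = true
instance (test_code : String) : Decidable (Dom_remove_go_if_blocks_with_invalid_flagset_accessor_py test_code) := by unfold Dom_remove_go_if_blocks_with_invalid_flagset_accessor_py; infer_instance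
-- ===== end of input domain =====

-- B replaces A's single pass with a pop-from-the-output list by a forward tagging pass plus a
-- backward reconstruction pass (alternative decomposition, same cost); return value only, no mutation.

-- ===== shared helpers (both Pythons call the same built-ins on each line) =====

-- s.splitlines(keepends=True), ported by hand over List Char: exact on the Dom alphabet
-- (printable ASCII + tab/newline/CR), where the only Python line breaks are '\n', '\r', '\r\n'.
def pvSplitKeepAux (acc : List Char) : List Char → List (List Char)
  | [] => if acc.isEmpty then [] else [acc.reverse]
  | '\r' :: '\n' :: rest => (acc.reverse ++ ['\r', '\n']) :: pvSplitKeepAux [] rest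
  | '\n' :: rest => (acc.reverse ++ ['\n']) :: pvSplitKeepAux [] rest
  | '\r' :: rest => (acc.reverse ++ ['\r']) :: pvSplitKeepAux [] rest
  | c :: rest => pvSplitKeepAux (c :: acc) rest

def pvSplitKeep (s : String) : List String :=
  (pvSplitKeepAux [] s.toList).map String.ofList

-- line.count("{") - line.count("}")
def pvBraces (l : String) : Int :=
  (PySem.Str.count l "{" : Int) - (PySem.Str.count l "}" : Int)

-- any(accessor in line for accessor in invalid_accessors) and line.lstrip().startswith("if ")
def pvTrigger (l : String) : Bool :=
  (PySem.Str.isIn ".Output()" l || PySem.Str.isIn ".ErrorHandling()" l || PySem.Str.isIn ".Name()" l)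
    && PySem.Str.startswith (PySem.Str.lstrip l) "if "

-- line.strip().startswith("//") or line.strip() == ""
def pvIsCommentOrBlank (l : String) : Bool :=
  PySem.Str.startswith (PySem.Str.strip l) "//" || (PySem.Str.strip l == "")

-- ===== PORT A =====

-- A's inner brace-skipping while-loop: consumes lines until depth <= 0
def pvSkipA (depth : Int) : List String → List String
  | [] => []
  | l :: ls => let d := depth + pvBraces l; if d ≤ 0 then ls else pvSkipA d ls

theorem pvSkipA_length_le (depth : Int) (ls : List String) : (pvSkipA depth ls).length ≤ ls.length := by
  induction ls generalizing depth with
  | nil => simp [pvSkipA]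
  | cons l ls ih =>
    simp only [pvSkipA]
    split
    · simp
    · exact Nat.le_trans (ih _) (Nat.le_succ _)

-- A's `while rewritten and (... "//") or ... == "": rewritten.pop()` on the REVERSED accumulator
def pvPopComments : List String → List String
  | [] => []
  | l :: ls => if pvIsCommentOrBlank l then pvPopComments ls else l :: ls

-- A's main while-loop; rewritten kept in reverse (append = cons, pop = drop from the front)
def pvGoA (revAcc : List String) (rest : List String) (changed : Bool) : List String × Bool :=
  match rest with
  | [] => (revAcc, changed)
  | l :: ls =>
    if pvTrigger l then
      pvGoA (pvPopComments revAcc) (pvSkipA (pvBraces l) ls) true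
    else
      pvGoA (l :: revAcc) ls changed
termination_by rest.length
decreasing_by
  · exact Nat.lt_succ_of_le (pvSkipA_length_le _ _)
  · simp

def remove_go_if_blocks_with_invalid_flagset_accessor_py (test_code : String) : String × Bool :=
  let lines := pvSplitKeep test_code
  let (rewritten, changed) := pvGoA [] lines false
  (PySem.Str.join "" rewritten.reverse, changed)

-- ===== PORT B =====

-- pass 1: tag every line with whether it belongs to a removed if-block
mutual
def pvTagLoop : List String → List (String × Bool)
  | [] => []
  | l :: ls =>
    if pvTrigger l then (l, true) :: pvBlockTag (pvBraces l) ls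
    else (l, false) :: pvTagLoop ls
termination_by ls => ls.length
def pvBlockTag (depth : Int) : List String → List (String × Bool)
  | [] => []
  | l :: ls =>
    let d := depth + pvBraces l
    (l, true) :: (if d ≤ 0 then pvTagLoop ls else pvBlockTag d ls)
termination_by ls => ls.length
end

-- pass 2: walk the tagged lines in reverse; a removed block swallows preceding comment/blank lines
def pvPass2 : List (String × Bool) → Bool → List String
  | [], _ => []
  | (l, d) :: ls, ext =>
    if d then pvPass2 ls true
    else if ext && pvIsCommentOrBlank l then pvPass2 ls true
    else l :: pvPass2 ls false

def remove_go_if_blocks_with_invalid_flagset_accessor_py_alt (test_code : String) : String × Bool :=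
  let lines := pvSplitKeep test_code
  let tagged := pvTagLoop lines
  let changed := tagged.any (·.2)
  let out := pvPass2 tagged.reverse false
  (PySem.Str.join "" out.reverse, changed)

-- ===== PRECONDITION & SPEC =====
def Spec_remove_go_if_blocks_with_invalid_flagset_accessor_py (test_code : String) (out : String × Bool) : Prop := out = remove_go_if_blocks_with_invalid_flagset_accessor_py_alt test_code
instance (test_code : String) (out : String × Bool) : Decidable (Spec_remove_go_if_blocks_with_invalid_flagset_accessor_py test_code out) := by unfold Spec_remove_go_if_blocks_with_invalid_flagset_accessor_py; infer_instance

-- ===== CLAIM (what is proved, stated in full; the proofs are below) =====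
def Claim_equal_remove_go_if_blocks_with_invalid_flagset_accessor_py : Prop := ∀ (test_code : String), Dom_remove_go_if_blocks_with_invalid_flagset_accessor_py test_code → Spec_remove_go_if_blocks_with_invalid_flagset_accessor_py test_code (remove_go_if_blocks_with_invalid_flagset_accessor_py test_code)

-- ===== LEMMAS AND PROOFS =====

-- the `extending` flag pvPass2 carries after consuming a list of tagged lines
def pvExtAfter (X : List (String × Bool)) (e : Bool) : Bool :=
  X.foldl (fun e ld => ld.2 || (e && pvIsCommentOrBlank ld.1)) e

theorem pvPass2_append (X Y : List (String × Bool)) (e : Bool) :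
    pvPass2 (X ++ Y) e = pvPass2 X e ++ pvPass2 Y (pvExtAfter X e) := by
  induction X generalizing e with
  | nil => simp [pvPass2, pvExtAfter]
  | cons x X ih =>
    obtain ⟨l, d⟩ := x
    simp only [List.cons_append, pvPass2, pvExtAfter, List.foldl_cons]
    by_cases hd : d
    · simp [hd, ih, pvExtAfter]
    · simp only [hd]
      by_cases he : e && pvIsCommentOrBlank l
      · simp [he, ih, pvExtAfter]
      · simp [he, ih, pvExtAfter]

theorem pvPass2_false_false (L : List String) :
    pvPass2 (L.map (fun l => (l, false))) false = L := by
  induction L with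
  | nil => rfl
  | cons l ls ih => simp [pvPass2, ih]

theorem pvPass2_false_true (L : List String) :
    pvPass2 (L.map (fun l => (l, false))) true = pvPopComments L := by
  induction L with
  | nil => rfl
  | cons l ls ih =>
    by_cases hp : pvIsCommentOrBlank l
    · simp [pvPass2, pvPopComments, hp, ih]
    · simp [pvPass2, pvPopComments, hp, pvPass2_false_false]

-- on the head-trimmed accumulator the flag no longer matters
theorem pvPass2_popComments (L : List String) (e : Bool) :
    pvPass2 ((pvPopComments L).map (fun l => (l, false))) e = pvPopComments L := by
  induction L with
  | nil => cases e <;> rfl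
  | cons l ls ih =>
    by_cases hp : pvIsCommentOrBlank l
    · simpa [pvPopComments, hp] using ih
    · cases e <;> simp [pvPopComments, hp, pvPass2, pvPass2_false_false]

theorem pvPass2_allTrue (T Y : List (String × Bool)) (e : Bool)
    (hT : ∀ x ∈ T, x.2 = true) (hne : T ≠ []) :
    pvPass2 (T ++ Y) e = pvPass2 Y true := by
  induction T generalizing e with
  | nil => exact absurd rfl hne
  | cons x T ih =>
    obtain ⟨l, d⟩ := x
    have hd : d = true := hT (l, d) (List.mem_cons_self)
    subst hd
    simp only [List.cons_append, pvPass2]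
    cases T with
    | nil => rfl
    | cons y T' => exact ih true (fun z hz => hT z (List.mem_cons_of_mem _ hz)) (by simp)

theorem pvBlockTag_decomp (ls : List String) (d : Int) :
    ∃ T, (∀ x ∈ T, x.2 = true) ∧ pvBlockTag d ls = T ++ pvTagLoop (pvSkipA d ls) := by
  induction ls generalizing d with
  | nil => exact ⟨[], by simp, by simp [pvBlockTag, pvTagLoop, pvSkipA]⟩
  | cons l ls ih =>
    by_cases h : d + pvBraces l ≤ 0
    · exact ⟨[(l, true)], by simp, by simp [pvBlockTag, pvSkipA, h]⟩
    · obtain ⟨T, hT, hEq⟩ := ih (d + pvBraces l)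
      exact ⟨(l, true) :: T, by simpa using hT,
        by simp [pvBlockTag, pvSkipA, h, hEq]⟩

-- the main loop invariant: A's state equals B's two passes run on the processed/unprocessed split
theorem pvGoA_eq (revAcc rest : List String) (changed : Bool) :
    pvGoA revAcc rest changed =
      (pvPass2 ((pvTagLoop rest).reverse ++ revAcc.map (fun l => (l, false))) false,
       changed || (pvTagLoop rest).any (·.2)) := by
  fun_induction pvGoA revAcc rest changed with
  | case1 revAcc changed =>
      simp [pvTagLoop, pvPass2_false_false]
  | case2 revAcc changed l ls htrig ih =>
      obtain ⟨T, hT, hEq⟩ := pvBlockTag_decomp ls (pvBraces l)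
      have hTag : pvTagLoop (l :: ls) = (l, true) :: (T ++ pvTagLoop (pvSkipA (pvBraces l) ls)) := by
        simp [pvTagLoop, htrig, hEq]
      have hAllTrue : ∀ x ∈ T.reverse ++ [(l, true)], x.2 = true := by
        intro x hx
        rcases List.mem_append.mp hx with h | h
        · exact hT x (List.mem_reverse.mp h)
        · simp at h; simp [h]
      have hlist :
          pvPass2 ((pvTagLoop (l :: ls)).reverse ++ revAcc.map (fun l => (l, false))) false
            = pvPass2 ((pvTagLoop (pvSkipA (pvBraces l) ls)).reverse
                ++ (pvPopComments revAcc).map (fun l => (l, false))) false := by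
        rw [hTag]
        have h1 : ((l, true) :: (T ++ pvTagLoop (pvSkipA (pvBraces l) ls))).reverse
              ++ revAcc.map (fun l => (l, false))
            = (pvTagLoop (pvSkipA (pvBraces l) ls)).reverse
              ++ ((T.reverse ++ [(l, true)]) ++ revAcc.map (fun l => (l, false))) := by
          simp
        rw [h1, pvPass2_append,
          pvPass2_allTrue (T.reverse ++ [(l, true)]) _ _ hAllTrue (by simp),
          pvPass2_false_true, pvPass2_append, pvPass2_popComments]
      have hAny : (pvTagLoop (l :: ls)).any (·.2) = true := by
        rw [hTag]; simp
      rw [ih, hlist, hAny]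
      simp
  | case3 revAcc changed l ls htrig ih =>
      have hTag : pvTagLoop (l :: ls) = (l, false) :: pvTagLoop ls := by
        simp [pvTagLoop, htrig]
      rw [ih, hTag]
      simp

-- ===== VERDICT (by name: the statement is the Claim_ definition above) =====
theorem remove_go_if_blocks_with_invalid_flagset_accessor_py_spec : Claim_equal_remove_go_if_blocks_with_invalid_flagset_accessor_py := by
  intro test_code _
  unfold Spec_remove_go_if_blocks_with_invalid_flagset_accessor_py
  unfold remove_go_if_blocks_with_invalid_flagset_accessor_py
  unfold remove_go_if_blocks_with_invalid_flagset_accessor_py_alt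
  simp only [pvGoA_eq, List.map_nil, List.append_nil, Bool.false_or]
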